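-- pv_equiv track=rewrite | github.com/Jiwon-Woo/BOJ | 프로그래머스/2/250136. ［PCCP 기출문제］ 2번 ／ 석유 시추/［PCCP 기출문제］ 2번 ／ 석유 시추.py | calculate_oil
-- ===== SOURCE A (Python) =====
-- def calculate_oil(land, n, m, id):
--     amount_of_oil = [0 for _ in range(id)]
--     col_of_oil = [set() for _ in range(m)]
--
--     for i in range(n):
--         for j in range(m):
--             if land[i][j] == 0:
--                 continue
--             amount_of_oil[land[i][j]] += 1
--             col_of_oil[j].add(land[i][j])
--
--     return amount_of_oil, col_of_oil
-- ===== SOURCE B (Python) =====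
-- def calculate_oil(land, n, m, id):
--     rows = land[:max(n, 0)]
--     cells = [v for row in rows for v in row[:max(m, 0)] if v != 0]
--     counts = {}
--     for v in cells:
--         counts[v] = counts.get(v, 0) + 1
--     amount_of_oil = [counts.get(k, 0) for k in range(id)]
--     col_of_oil = [{row[j] for row in rows if row[j] != 0} for j in range(m)]
--     return amount_of_oil, col_of_oil
-- ===== Notes on version B (the rewrite author's own statement) =====
-- stated objective: simpler
-- what changed: A's fused row-major double loop mutating both accumulators in place is replaced by independent comprehension passes: a flat list of nonzero scanned cells counted into a dict for the amounts, and a column-wise set comprehension for the column sets.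
-- intended difference: On grids whose scanned region contains a negative value v, A returns an amount list where slot id+v was incremented via Python negative-index wraparound, while B returns the true count of each id 0..id-1 there; B's per-id counts are the intended value. — e.g. on calculate_oil([[-1]], 1, 1, 2): A returns ([0, 1], [[-1]]), B returns ([0, 0], [[-1]])
import Mathlib
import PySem

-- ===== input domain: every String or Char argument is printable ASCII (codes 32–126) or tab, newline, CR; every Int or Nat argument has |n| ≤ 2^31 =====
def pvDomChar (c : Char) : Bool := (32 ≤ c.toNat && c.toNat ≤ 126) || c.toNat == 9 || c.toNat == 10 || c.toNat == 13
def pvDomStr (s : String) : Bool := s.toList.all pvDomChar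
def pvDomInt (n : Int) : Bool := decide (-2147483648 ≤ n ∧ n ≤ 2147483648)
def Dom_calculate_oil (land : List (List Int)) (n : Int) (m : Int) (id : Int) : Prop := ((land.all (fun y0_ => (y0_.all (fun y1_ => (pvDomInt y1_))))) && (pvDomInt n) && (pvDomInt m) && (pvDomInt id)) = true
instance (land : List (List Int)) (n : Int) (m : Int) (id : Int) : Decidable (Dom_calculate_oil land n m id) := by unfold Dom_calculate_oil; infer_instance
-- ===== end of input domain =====

-- B replaces A's fused in-place double loop by independent comprehension passes (flat counter for amounts,
-- column-wise set comprehension for columns); objective: simpler. Equivalence is about return values only.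

-- ===== PORT A =====
def calculate_oil (land : List (List Int)) (n : Int) (m : Int) (id : Int) : List Int × List (List Int) :=
  let amount_of_oil : List Int := (PySem.List.pyRange 0 id 1).map (fun _ => 0)
  let col_of_oil : List (List Int) := (PySem.List.pyRange 0 m 1).map (fun _ => PySem.Set.empty)
  (PySem.List.pyRange 0 n 1).foldl (fun st i =>
    (PySem.List.pyRange 0 m 1).foldl (fun st j =>
      let v := PySem.List.pyGetD (PySem.List.pyGetD land i []) j 0
      if v = 0 then st
      else (PySem.List.pySetD st.1 v (PySem.List.pyGetD st.1 v 0 + 1),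
            PySem.List.pySetD st.2 j (PySem.Set.add (PySem.List.pyGetD st.2 j PySem.Set.empty) v)))
      st)
    (amount_of_oil, col_of_oil)

-- ===== PORT B =====
def calculate_oil_alt (land : List (List Int)) (n : Int) (m : Int) (id : Int) : List Int × List (List Int) :=
  let rows : List (List Int) := PySem.List.slice land none (some (max n 0))
  let cells : List Int := rows.flatMap
      (fun row => (PySem.List.slice row none (some (max m 0))).filter (fun v => decide (v ≠ 0)))
  let counts : PySem.Dict Int Int := cells.foldl (fun d v => d.insert v (d.getD v 0 + 1)) PySem.Dict.empty
  let amount_of_oil : List Int := (PySem.List.pyRange 0 id 1).map (fun k => counts.getD k 0)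
  let col_of_oil : List (List Int) := (PySem.List.pyRange 0 m 1).map (fun j =>
      PySem.Set.ofList ((rows.map
        (fun row => PySem.List.pyGetD row j 0)).filter (fun v => decide (v ≠ 0))))
  (amount_of_oil, col_of_oil)

-- ===== PRECONDITION & SPEC =====
-- Pre_ is exactly the inputs on which A returns normally: when 0 < m (otherwise A's inner loop is empty
-- and it never indexes anything), range(n) must stay inside land, every scanned row must have at least m
-- cells, and every nonzero scanned value must lie in [-id, id) — otherwise A raises IndexError.
def Pre_calculate_oil (land : List (List Int)) (n : Int) (m : Int) (id : Int) : Prop :=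
  0 < m → (n ≤ (land.length : Int) ∧
  (∀ row ∈ land.take n.toNat, m ≤ (row.length : Int)) ∧
  (∀ row ∈ land.take n.toNat, ∀ v ∈ row.take m.toNat, v ≠ 0 → (-id ≤ v ∧ v < id)))
instance (land : List (List Int)) (n : Int) (m : Int) (id : Int) : Decidable (Pre_calculate_oil land n m id) := by unfold Pre_calculate_oil; infer_instance
def pvWitness_calculate_oil : List (List Int) × Int × Int × Int := ([[1, 0], [2, 1]], 2, 2, 3)

-- On grids whose scanned region contains a negative value v, A adds that cell to slot id+v of the amount
-- list via Python's negative-index wraparound, while B reports the true per-id counts for ids 0..id-1;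
-- B's value is the intended per-id oil count.
def D_calculate_oil (land : List (List Int)) (n : Int) (m : Int) (id : Int) : Prop :=
  ∃ row ∈ land.take n.toNat, ∃ v ∈ row.take m.toNat, v < 0
instance (land : List (List Int)) (n : Int) (m : Int) (id : Int) : Decidable (D_calculate_oil land n m id) := by unfold D_calculate_oil; infer_instance

def Spec_calculate_oil (land : List (List Int)) (n : Int) (m : Int) (id : Int) (out : List Int × List (List Int)) : Prop := ¬ D_calculate_oil land n m id → out = calculate_oil_alt land n m id
instance (land : List (List Int)) (n : Int) (m : Int) (id : Int) (out : List Int × List (List Int)) : Decidable (Spec_calculate_oil land n m id out) := by unfold Spec_calculate_oil; infer_instance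

def pvDiffWitness_calculate_oil : List (List Int) × Int × Int × Int := ([[-1]], 1, 1, 2)
def pvDiffWitnessOut_calculate_oil : (List Int × List (List Int)) × (List Int × List (List Int)) :=
  (([0, 1], [[-1]]), ([0, 0], [[-1]]))

-- ===== CLAIM (what is proved, stated in full; the proofs are below) =====
def Claim_unchanged_calculate_oil : Prop := ∀ (land : List (List Int)) (n : Int) (m : Int) (id : Int), Dom_calculate_oil land n m id → Pre_calculate_oil land n m id → Spec_calculate_oil land n m id (calculate_oil land n m id)
def Claim_changed_calculate_oil : Prop := Dom_calculate_oil (pvDiffWitness_calculate_oil.1) (pvDiffWitness_calculate_oil.2.1) (pvDiffWitness_calculate_oil.2.2.1) (pvDiffWitness_calculate_oil.2.2.2) ∧ Pre_calculate_oil (pvDiffWitness_calculate_oil.1) (pvDiffWitness_calculate_oil.2.1) (pvDiffWitness_calculate_oil.2.2.1) (pvDiffWitness_calculate_oil.2.2.2) ∧ D_calculate_oil (pvDiffWitness_calculate_oil.1) (pvDiffWitness_calculate_oil.2.1) (pvDiffWitness_calculate_oil.2.2.1) (pvDiffWitness_calculate_oil.2.2.2) ∧ calculate_oil (pvDiffWitness_calculate_oil.1)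 (pvDiffWitness_calculate_oil.2.1) (pvDiffWitness_calculate_oil.2.2.1) (pvDiffWitness_calculate_oil.2.2.2) = pvDiffWitnessOut_calculate_oil.1 ∧ calculate_oil_alt (pvDiffWitness_calculate_oil.1) (pvDiffWitness_calculate_oil.2.1) (pvDiffWitness_calculate_oil.2.2.1) (pvDiffWitness_calculate_oil.2.2.2) = pvDiffWitnessOut_calculate_oil.2 ∧ pvDiffWitnessOut_calculate_oil.1 ≠ pvDiffWitnessOut_calculate_oil.2

def Claim_exact_calculate_oil : Prop := ∀ (land : List (List Int)) (n : Int) (m : Int) (id : Int), Dom_calculate_oil land n m id → Pre_calculate_oil land n m id → D_calculate_oil land n m id → calculate_oil land n m id ≠ calculate_oil_alt land n m id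

-- ===== LEMMAS AND PROOFS =====

-- Repeated 'a[v] += 1' on positive in-range v is counting.
theorem pv_incr_fold (vs : List Int) :
    ∀ (a : List Int), (∀ v ∈ vs, 0 < v ∧ v < (a.length : Int)) →
      (vs.foldl (fun a v => PySem.List.pySetD a v (PySem.List.pyGetD a v 0 + 1)) a).length = a.length ∧
      ∀ k : Nat, k < a.length →
        (vs.foldl (fun a v => PySem.List.pySetD a v (PySem.List.pyGetD a v 0 + 1)) a).getD k 0
          = a.getD k 0 + vs.count (k : Int) := by
  induction vs with
  | nil => intro a _; simp
  | cons v vs ih =>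
    intro a hv
    obtain ⟨hv0, hvlen⟩ := hv v (by simp)
    have hstep : PySem.List.pySetD a v (PySem.List.pyGetD a v 0 + 1)
        = a.set v.toNat (a.getD v.toNat 0 + 1) := by
      rw [PySem.List.pySetD_of_nonneg a _ (by omega), PySem.List.pyGetD_of_nonneg a _ (by omega)]
    simp only [List.foldl_cons, hstep]
    have hlen : (a.set v.toNat (a.getD v.toNat 0 + 1)).length = a.length := by simp
    obtain ⟨ihlen, ihget⟩ := ih (a.set v.toNat (a.getD v.toNat 0 + 1))
      (by intro w hw; have := hv w (by simp [hw]); simpa [hlen] using this)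
    refine ⟨by rw [ihlen, hlen], ?_⟩
    intro k hk
    rw [ihget k (by omega)]
    have hvna : v.toNat < a.length := by omega
    rw [List.count_cons]
    by_cases hkv : k = v.toNat
    · have h1 : (a.set v.toNat (a.getD v.toNat 0 + 1)).getD k 0 = a.getD k 0 + 1 := by
        subst hkv; simp [List.getD, hk]
      have h2 : (v == (k : Int)) = true := by simp; omega
      rw [h1, h2]; simp; omega
    · have h1 : (a.set v.toNat (a.getD v.toNat 0 + 1)).getD k 0 = a.getD k 0 := by
        simp [List.getD, Ne.symm hkv]
      have h2 : (v == (k : Int)) = false := by simp; omega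
      rw [h1, h2]; simp

-- One inner pass of A over j in range(a, m) updates each column slot at most once.
theorem pv_onerow (row : List Int) (m : Int) :
    ∀ (t : Nat) (a : Int), 0 ≤ a → (m - a).toNat = t → ∀ (c : List (List Int)),
      ((PySem.List.pyRange a m 1).foldl (fun c j =>
          let v := PySem.List.pyGetD row j 0
          if v = 0 then c
          else PySem.List.pySetD c j (PySem.Set.add (PySem.List.pyGetD c j PySem.Set.empty) v)) c).length
        = c.length ∧
      ∀ k : Nat, k < c.length →
        ((PySem.List.pyRange a m 1).foldl (fun c j =>
            let v := PySem.List.pyGetD row j 0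
            if v = 0 then c
            else PySem.List.pySetD c j (PySem.Set.add (PySem.List.pyGetD c j PySem.Set.empty) v)) c).getD k []
          = if a ≤ (k : Int) ∧ (k : Int) < m then
              (let v := PySem.List.pyGetD row (k : Int) 0
               if v = 0 then c.getD k [] else PySem.Set.add (c.getD k []) v)
            else c.getD k [] := by
  intro t
  induction t with
  | zero =>
    intro a ha ht c
    rw [PySem.List.pyRange_one_eq_nil (by omega)]
    refine ⟨rfl, ?_⟩
    intro k hk
    simp only [List.foldl_nil]
    rw [if_neg (by omega)]
  | succ t ih =>
    intro a ha ht c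
    have ham : a < m := by omega
    rw [PySem.List.pyRange_one_cons ham]
    simp only [List.foldl_cons]
    set c1 : List (List Int) :=
      (if PySem.List.pyGetD row a 0 = 0 then c
       else PySem.List.pySetD c a
         (PySem.Set.add (PySem.List.pyGetD c a PySem.Set.empty) (PySem.List.pyGetD row a 0)))
      with hc1
    have hc1len : c1.length = c.length := by
      rw [hc1]
      split
      · rfl
      · rw [PySem.List.pySetD_of_nonneg c _ ha]; simp
    have hc1get : ∀ k : Nat, k < c.length →
        c1.getD k [] = if (k : Int) = a then
            (if PySem.List.pyGetD row a 0 = 0 then c.getD k []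
             else PySem.Set.add (c.getD k []) (PySem.List.pyGetD row a 0))
          else c.getD k [] := by
      intro k hk
      rw [hc1]
      by_cases hv : PySem.List.pyGetD row a 0 = 0
      · rw [if_pos hv]
        split
        · simp
        · rfl
      · rw [if_neg hv, PySem.List.pySetD_of_nonneg c _ ha, PySem.List.pyGetD_of_nonneg c _ ha]
        by_cases hka : (k : Int) = a
        · have hkn : k = a.toNat := by omega
          rw [if_pos hka, if_neg hv, ← hkn]
          simp [List.getD, hk, PySem.Set.empty]
        · have hkn : a.toNat ≠ k := by omega
          rw [if_neg hka]
          simp [List.getD, hkn]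
    obtain ⟨ihlen, ihget⟩ := ih (a + 1) (by omega) (by omega) c1
    refine ⟨by rw [ihlen, hc1len], ?_⟩
    intro k hk
    by_cases hka : (k : Int) = a
    · rw [ihget k (by omega), if_neg (by omega), hc1get k hk, if_pos hka]
      have hcond : a ≤ (k : Int) ∧ (k : Int) < m := by omega
      rw [if_pos hcond, hka]
    · rw [ihget k (by omega), hc1get k hk, if_neg hka]
      by_cases hin : a + 1 ≤ (k : Int) ∧ (k : Int) < m
      · have hcond : a ≤ (k : Int) ∧ (k : Int) < m := by omega
        rw [if_pos hin, if_pos hcond]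
      · have hcond : ¬(a ≤ (k : Int) ∧ (k : Int) < m) := by omega
        rw [if_neg hin, if_neg hcond]

-- A's column accumulator, slot k, is a fold of Set.add over the nonzero entries of column k.
theorem pv_cols_fold (m : Int) (rows : List (List Int)) :
    ∀ (c : List (List Int)),
      (rows.foldl (fun c row =>
          (PySem.List.pyRange 0 m 1).foldl (fun c j =>
            let v := PySem.List.pyGetD row j 0
            if v = 0 then c
            else PySem.List.pySetD c j (PySem.Set.add (PySem.List.pyGetD c j PySem.Set.empty) v)) c) c).length
        = c.length ∧
      ∀ k : Nat, k < c.length → (k : Int) < m →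
        (rows.foldl (fun c row =>
            (PySem.List.pyRange 0 m 1).foldl (fun c j =>
              let v := PySem.List.pyGetD row j 0
              if v = 0 then c
              else PySem.List.pySetD c j (PySem.Set.add (PySem.List.pyGetD c j PySem.Set.empty) v)) c) c).getD k []
          = ((rows.map (fun row => PySem.List.pyGetD row (k : Int) 0)).filter
              (fun v => decide (v ≠ 0))).foldl PySem.Set.add (c.getD k []) := by
  induction rows with
  | nil => intro c; exact ⟨rfl, fun k hk hkm => by simp⟩
  | cons row rows ih =>
    intro c
    simp only [List.foldl_cons]
    obtain ⟨h1len, h1get⟩ := pv_onerow row m (m - 0).toNat 0 (le_refl 0) rfl c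
    obtain ⟨ihlen, ihget⟩ := ih ((PySem.List.pyRange 0 m 1).foldl (fun c j =>
        let v := PySem.List.pyGetD row j 0
        if v = 0 then c
        else PySem.List.pySetD c j (PySem.Set.add (PySem.List.pyGetD c j PySem.Set.empty) v)) c)
    refine ⟨by rw [ihlen, h1len], ?_⟩
    intro k hk hkm
    rw [ihget k (by rw [h1len]; exact hk) hkm, h1get k hk, if_pos ⟨by omega, hkm⟩]
    rw [List.map_cons]
    by_cases hv : PySem.List.pyGetD row (k : Int) 0 = 0
    · rw [List.filter_cons_of_neg (by simp [hv])]
      simp [hv]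
    · rw [List.filter_cons_of_pos (by simpa using hv), List.foldl_cons]
      simp only [if_neg hv]

theorem pv_fold_rows_flatten {β : Type} (f : β → Int → β) (g : List Int → List Int) :
    ∀ (rows : List (List Int)) (init : β),
      rows.foldl (fun a row => (g row).foldl f a) init = ((rows.map g).flatten).foldl f init := by
  intro rows
  induction rows with
  | nil => intro init; rfl
  | cons r rs ih =>
    intro init
    simp only [List.foldl_cons, List.map_cons, List.flatten_cons, List.foldl_append]
    exact ih (List.foldl f init (g r))

theorem pv_foldl_skip_zero {β : Type} (f : β → Int → β) :
    ∀ (l : List Int) (init : β),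
      l.foldl (fun a v => if v = 0 then a else f a v) init
        = (l.filter (fun v => decide (v ≠ 0))).foldl f init := by
  intro l
  induction l with
  | nil => intro init; rfl
  | cons v vs ih =>
    intro init
    by_cases h : v = 0
    · rw [List.foldl_cons, if_pos h, List.filter_cons_of_neg (by simp [h]), ih]
    · rw [List.foldl_cons, if_neg h, List.filter_cons_of_pos (by simpa using h), List.foldl_cons, ih]

-- A's fused pair-state double loop splits into two independent double loops.
theorem pv_split (land : List (List Int)) (n : Int) (m : Int) (id : Int) :
    calculate_oil land n m id =
      ((PySem.List.pyRange 0 n 1).foldl (fun a i =>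
          (PySem.List.pyRange 0 m 1).foldl (fun a j =>
            let v := PySem.List.pyGetD (PySem.List.pyGetD land i []) j 0
            if v = 0 then a else PySem.List.pySetD a v (PySem.List.pyGetD a v 0 + 1)) a)
        ((PySem.List.pyRange 0 id 1).map (fun _ => (0 : Int))),
       (PySem.List.pyRange 0 n 1).foldl (fun c i =>
          (PySem.List.pyRange 0 m 1).foldl (fun c j =>
            let v := PySem.List.pyGetD (PySem.List.pyGetD land i []) j 0
            if v = 0 then c
            else PySem.List.pySetD c j (PySem.Set.add (PySem.List.pyGetD c j PySem.Set.empty) v)) c)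
        ((PySem.List.pyRange 0 m 1).map (fun _ => PySem.Set.empty))) := by
  unfold calculate_oil
  have hinner : ∀ (st : List Int × List (List Int)) (i : Int),
      (PySem.List.pyRange 0 m 1).foldl (fun st j =>
        let v := PySem.List.pyGetD (PySem.List.pyGetD land i []) j 0
        if v = 0 then st
        else (PySem.List.pySetD st.1 v (PySem.List.pyGetD st.1 v 0 + 1),
              PySem.List.pySetD st.2 j (PySem.Set.add (PySem.List.pyGetD st.2 j PySem.Set.empty) v))) st
      = ((PySem.List.pyRange 0 m 1).foldl (fun a j =>
            let v := PySem.List.pyGetD (PySem.List.pyGetD land i []) j 0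
            if v = 0 then a else PySem.List.pySetD a v (PySem.List.pyGetD a v 0 + 1)) st.1,
         (PySem.List.pyRange 0 m 1).foldl (fun c j =>
            let v := PySem.List.pyGetD (PySem.List.pyGetD land i []) j 0
            if v = 0 then c
            else PySem.List.pySetD c j (PySem.Set.add (PySem.List.pyGetD c j PySem.Set.empty) v)) st.2) := by
    intro st i
    rw [show (fun (st : List Int × List (List Int)) (j : Int) =>
        let v := PySem.List.pyGetD (PySem.List.pyGetD land i []) j 0
        if v = 0 then st
        else (PySem.List.pySetD st.1 v (PySem.List.pyGetD st.1 v 0 + 1),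
              PySem.List.pySetD st.2 j (PySem.Set.add (PySem.List.pyGetD st.2 j PySem.Set.empty) v)))
      = (fun (st : List Int × List (List Int)) (j : Int) =>
          ((fun (a : List Int) (j : Int) =>
            let v := PySem.List.pyGetD (PySem.List.pyGetD land i []) j 0
            if v = 0 then a else PySem.List.pySetD a v (PySem.List.pyGetD a v 0 + 1)) st.1 j,
           (fun (c : List (List Int)) (j : Int) =>
            let v := PySem.List.pyGetD (PySem.List.pyGetD land i []) j 0
            if v = 0 then c
            else PySem.List.pySetD c j (PySem.Set.add (PySem.List.pyGetD c j PySem.Set.empty) v)) st.2 j)) from by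
        funext st j; dsimp only; split <;> rfl]
    exact PySem.List.foldl_prod_mk
      (f := fun (a : List Int) (j : Int) =>
        let v := PySem.List.pyGetD (PySem.List.pyGetD land i []) j 0
        if v = 0 then a else PySem.List.pySetD a v (PySem.List.pyGetD a v 0 + 1))
      (g := fun (c : List (List Int)) (j : Int) =>
        let v := PySem.List.pyGetD (PySem.List.pyGetD land i []) j 0
        if v = 0 then c
        else PySem.List.pySetD c j (PySem.Set.add (PySem.List.pyGetD c j PySem.Set.empty) v))
      (PySem.List.pyRange 0 m 1) st.1 st.2
  simp only [hinner]
  exact PySem.List.foldl_prod_mk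
    (f := fun (a : List Int) (i : Int) =>
      (PySem.List.pyRange 0 m 1).foldl (fun a j =>
        let v := PySem.List.pyGetD (PySem.List.pyGetD land i []) j 0
        if v = 0 then a else PySem.List.pySetD a v (PySem.List.pyGetD a v 0 + 1)) a)
    (g := fun (c : List (List Int)) (i : Int) =>
      (PySem.List.pyRange 0 m 1).foldl (fun c j =>
        let v := PySem.List.pyGetD (PySem.List.pyGetD land i []) j 0
        if v = 0 then c
        else PySem.List.pySetD c j (PySem.Set.add (PySem.List.pyGetD c j PySem.Set.empty) v)) c)
    (PySem.List.pyRange 0 n 1)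
    ((PySem.List.pyRange 0 id 1).map (fun _ => (0 : Int)))
    ((PySem.List.pyRange 0 m 1).map (fun _ => PySem.Set.empty))

-- generic: a fold over range(n) reading land[i] is a fold over the first n rows

-- A fold over range(n) reading land[i] is a fold over the first n rows (same for a row).
theorem pv_outer_to_list {β : Type} (land : List (List Int)) (n : Int)
    (hn0 : 0 ≤ n) (hnlen : n ≤ (land.length : Int)) (F : β → List Int → β) (init : β) :
    (PySem.List.pyRange 0 n 1).foldl (fun acc i => F acc (PySem.List.pyGetD land i [])) init
      = (land.take n.toNat).foldl F init := by
  have hlen : (land.take n.toNat).length = n.toNat := by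
    rw [List.length_take]; omega
  have hcast : ((land.take n.toNat).length : Int) = n := by
    rw [hlen]; exact Int.toNat_of_nonneg hn0
  have hcongr : ∀ i ∈ PySem.List.pyRange 0 n 1, ∀ acc : β,
      F acc (PySem.List.pyGetD land i []) = F acc (PySem.List.pyGetD (land.take n.toNat) i []) := by
    intro i hi acc
    rw [PySem.List.mem_pyRange_one] at hi
    rw [PySem.List.pyGetD_of_nonneg land _ hi.1, PySem.List.pyGetD_of_nonneg _ _ hi.1]
    congr 1
    have hit : i.toNat < n.toNat := by omega
    simp [List.getD, List.getElem?_take, hit]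
  have hmain := PySem.List.foldl_pyRange_zero_pyGetD' (land.take n.toNat) [] F init
  rw [hcast] at hmain
  rw [PySem.List.foldl_congr_mem' _ _ _ init hcongr, hmain]

theorem pv_inner_to_list {β : Type} (row : List Int) (m : Int)
    (hm0 : 0 ≤ m) (hml : m ≤ (row.length : Int)) (f : β → Int → β) (init : β) :
    (PySem.List.pyRange 0 m 1).foldl (fun acc j => f acc (PySem.List.pyGetD row j 0)) init
      = (row.take m.toNat).foldl f init := by
  have hlen : (row.take m.toNat).length = m.toNat := by
    rw [List.length_take]; omega
  have hcast : ((row.take m.toNat).length : Int) = m := by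
    rw [hlen]; exact Int.toNat_of_nonneg hm0
  have hcongr : ∀ j ∈ PySem.List.pyRange 0 m 1, ∀ acc : β,
      f acc (PySem.List.pyGetD row j 0) = f acc (PySem.List.pyGetD (row.take m.toNat) j 0) := by
    intro j hj acc
    rw [PySem.List.mem_pyRange_one] at hj
    rw [PySem.List.pyGetD_of_nonneg row _ hj.1, PySem.List.pyGetD_of_nonneg _ _ hj.1]
    congr 1
    have hjt : j.toNat < m.toNat := by omega
    simp [List.getD, List.getElem?_take, hjt]
  have hmain := PySem.List.foldl_pyRange_zero_pyGetD' (row.take m.toNat) 0 f init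
  rw [hcast] at hmain
  rw [PySem.List.foldl_congr_mem' _ _ _ init hcongr, hmain]

theorem pv_pyRange_max (n : Int) : PySem.List.pyRange 0 n 1 = PySem.List.pyRange 0 (max n 0) 1 := by
  rcases le_total n 0 with h | h
  · rw [PySem.List.pyRange_one_eq_nil h, PySem.List.pyRange_one_eq_nil (by omega)]
  · rw [max_eq_left h]

-- If m ≤ 0 both programs scan nothing and agree trivially.
theorem pv_trivial_m (land : List (List Int)) (n : Int) (m : Int) (id : Int) (hm : m ≤ 0) :
    calculate_oil land n m id = calculate_oil_alt land n m id := by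
  have hr : PySem.List.pyRange 0 m 1 = [] := PySem.List.pyRange_one_eq_nil hm
  have hmm0 : max m 0 = 0 := by omega
  have hA : calculate_oil land n m id
      = ((PySem.List.pyRange 0 id 1).map (fun _ => (0 : Int)), ([] : List (List Int))) := by
    unfold calculate_oil
    rw [hr]
    simp only [List.map_nil, List.foldl_nil]
    exact PySem.List.foldl_ignore _ _
  have hsl : ∀ row : List Int, PySem.List.slice row none (some (0 : Int)) = [] := by
    intro row
    rw [PySem.List.slice_to row (le_refl (0 : Int))]
    rfl
  have hB : calculate_oil_alt land n m id
      = ((PySem.List.pyRange 0 id 1).map (fun _ => (0 : Int)), ([] : List (List Int))) := by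
    unfold calculate_oil_alt
    dsimp only
    rw [hr, hmm0]
    have h0 : (PySem.List.slice land none (some (max n 0))).flatMap
        (fun row => (PySem.List.slice row none (some (0 : Int))).filter
          (fun v => decide (v ≠ 0))) = [] := by
      simp [hsl]
    rw [h0]
    simp [PySem.Dict.getD_empty]
  rw [hA, hB]

theorem pv_cellsB (land : List (List Int)) (n m : Int) (hn0 : 0 ≤ n) (hm0 : 0 ≤ m) :
    (PySem.List.slice land none (some n)).flatMap
      (fun row => (PySem.List.slice row none (some m)).filter (fun v => decide (v ≠ 0)))
      = (((land.take n.toNat).map (fun row => row.take m.toNat)).flatten).filter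
          (fun v => decide (v ≠ 0)) := by
  rw [PySem.List.slice_to land hn0]
  simp only [PySem.List.slice_to _ hm0]
  rw [List.filter_flatten, List.map_map, List.flatMap_def]
  rfl

theorem pv_eA (land : List (List Int)) (n m id : Int)
  (hn0 : 0 ≤ n) (hnlen : n ≤ (land.length : Int)) (hm0 : 0 ≤ m)
  (hrowlen : ∀ row ∈ land.take n.toNat, m ≤ (row.length : Int)) : (PySem.List.pyRange 0 n 1).foldl (fun a i =>
      (PySem.List.pyRange 0 m 1).foldl (fun a j =>
        let v := PySem.List.pyGetD (PySem.List.pyGetD land i []) j 0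
        if v = 0 then a else PySem.List.pySetD a v (PySem.List.pyGetD a v 0 + 1)) a)
    ((PySem.List.pyRange 0 id 1).map (fun _ => (0 : Int)))
    = ((((land.take n.toNat).map (fun row => row.take m.toNat)).flatten).filter
        (fun v => decide (v ≠ 0))).foldl
        (fun a v => PySem.List.pySetD a v (PySem.List.pyGetD a v 0 + 1))
        ((PySem.List.pyRange 0 id 1).map (fun _ => (0 : Int))) := by
  rw [pv_outer_to_list land n hn0 hnlen
    (F := fun a row => (PySem.List.pyRange 0 m 1).foldl (fun a j =>
      let v := PySem.List.pyGetD row j 0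
      if v = 0 then a else PySem.List.pySetD a v (PySem.List.pyGetD a v 0 + 1)) a)]
  rw [PySem.List.foldl_congr_mem' _ _
    (fun a row => (row.take m.toNat).foldl (fun a v =>
      if v = 0 then a else PySem.List.pySetD a v (PySem.List.pyGetD a v 0 + 1)) a) _
    (by
      intro row hrow acc
      exact pv_inner_to_list row m hm0 (hrowlen row hrow)
        (fun a v => if v = 0 then a else PySem.List.pySetD a v (PySem.List.pyGetD a v 0 + 1)) acc)]
  rw [pv_fold_rows_flatten (fun a v =>
      if v = 0 then a else PySem.List.pySetD a v (PySem.List.pyGetD a v 0 + 1))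
    (List.take m.toNat) (land.take n.toNat)]
  rw [pv_foldl_skip_zero (fun a v =>
    PySem.List.pySetD a v (PySem.List.pyGetD a v 0 + 1))]


theorem pv_sum_set : ∀ (l : List Int) (i : Nat) (x : Int), i < l.length →
    (l.set i x).sum = l.sum - l.getD i 0 + x := by
  intro l
  induction l with
  | nil => intro i x h; simp at h
  | cons a t ih =>
    intro i x h
    cases i with
    | zero => simp [List.getD]; ring
    | succ i =>
      simp only [List.set_cons_succ, List.sum_cons, List.getD_cons_succ]
      rw [ih i x (by simpa using h)]
      ring

theorem pv_incr_step (a : List Int) (v : Int) (h1 : -(a.length : Int) ≤ v) (h2 : v < (a.length : Int)) :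
    (PySem.List.pySetD a v (PySem.List.pyGetD a v 0 + 1)).sum = a.sum + 1 ∧
    (PySem.List.pySetD a v (PySem.List.pyGetD a v 0 + 1)).length = a.length := by
  by_cases hv : 0 ≤ v
  · have hidx : PySem.List.pyIdx? a.length v = some v.toNat := by
      simp only [PySem.List.pyIdx?, if_pos hv, if_pos h2]
    have hset : PySem.List.pySetD a v (PySem.List.pyGetD a v 0 + 1)
        = a.set v.toNat (a.getD v.toNat 0 + 1) := by
      simp [PySem.List.pySetD, PySem.List.pySet?, PySem.List.pyGetD, PySem.List.pyGet?, hidx, List.getD]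
    rw [hset, pv_sum_set a v.toNat _ (by omega)]
    constructor
    · ring
    · simp
  · have hidx : PySem.List.pyIdx? a.length v = some (a.length - (-v).toNat) := by
      simp only [PySem.List.pyIdx?, if_neg hv, if_pos (by omega : -(a.length : Int) ≤ v)]
    have hset : PySem.List.pySetD a v (PySem.List.pyGetD a v 0 + 1)
        = a.set (a.length - (-v).toNat) (a.getD (a.length - (-v).toNat) 0 + 1) := by
      simp [PySem.List.pySetD, PySem.List.pySet?, PySem.List.pyGetD, PySem.List.pyGet?, hidx, List.getD]
    rw [hset, pv_sum_set a (a.length - (-v).toNat) _ (by omega)]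
    constructor
    · ring
    · simp

theorem pv_sum_incr_fold (vs : List Int) :
    ∀ (a : List Int), (∀ v ∈ vs, -(a.length : Int) ≤ v ∧ v < (a.length : Int)) →
      (vs.foldl (fun a v => PySem.List.pySetD a v (PySem.List.pyGetD a v 0 + 1)) a).sum
        = a.sum + vs.length ∧
      (vs.foldl (fun a v => PySem.List.pySetD a v (PySem.List.pyGetD a v 0 + 1)) a).length
        = a.length := by
  induction vs with
  | nil => intro a _; simp
  | cons v vs ih =>
    intro a hv
    obtain ⟨hs, hl⟩ := pv_incr_step a v (hv v (by simp)).1 (hv v (by simp)).2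
    simp only [List.foldl_cons]
    obtain ⟨ihs, ihl⟩ := ih (PySem.List.pySetD a v (PySem.List.pyGetD a v 0 + 1))
      (by intro w hw; have := hv w (by simp [hw]); rw [hl]; exact this)
    refine ⟨?_, by rw [ihl, hl]⟩
    rw [ihs, hs]
    simp only [List.length_cons]
    push_cast
    ring

theorem pv_sum_counts (ks : List Int) (hnd : ks.Nodup) :
    ∀ (l : List Int),
      (ks.map (fun k => (l.count k : Int))).sum = (l.countP (fun v => decide (v ∈ ks)) : Int) := by
  intro l
  induction l with
  | nil => simp
  | cons v t ih =>
    have hcnt : (fun k => (((v :: t).count k : Nat) : Int))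
        = fun k => ((t.count k : Nat) : Int) + (if v == k then 1 else 0) := by
      funext k
      rw [List.count_cons]
      push_cast
      split <;> simp
    rw [hcnt, PySem.List.sum_map_add_int, ih, PySem.List.sum_map_ite_one_zero]
    have h1 : ks.countP (fun k => v == k) = ks.count v := by
      unfold List.count
      apply List.countP_congr
      intro k _
      rw [Bool.beq_comm (a := v) (b := k)]
    have h2 : ks.count v = (if v ∈ ks then 1 else 0) := by
      by_cases h : v ∈ ks
      · rw [if_pos h]
        exact List.count_eq_one_of_mem hnd h
      · rw [if_neg h]
        exact List.count_eq_zero_of_not_mem h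
    rw [List.countP_cons]
    rw [h1, h2]
    by_cases h : v ∈ ks
    · simp [h]
    · simp [h]


theorem pv_main : ∀ (land : List (List Int)) (n : Int) (m : Int) (id : Int),
    (0 ≤ n ∧ n ≤ (land.length : Int) ∧ 0 ≤ m ∧
     (∀ row ∈ land.take n.toNat, m ≤ (row.length : Int)) ∧
     (∀ row ∈ land.take n.toNat, ∀ v ∈ row.take m.toNat, v ≠ 0 → (-id ≤ v ∧ v < id))) →
    ¬ (∃ row ∈ land.take n.toNat, ∃ v ∈ row.take m.toNat, v < 0) →
    calculate_oil land n m id = calculate_oil_alt land n m id := by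
  intro land n m id hPre hD
  obtain ⟨hn0, hnlen, hm0, hrowlen, hval⟩ := hPre
  push_neg at hD
  rw [pv_split]
  have halt : calculate_oil_alt land n m id =
      ((PySem.List.pyRange 0 id 1).map (fun k =>
        (((PySem.List.slice land none (some (max n 0))).flatMap
            (fun row => (PySem.List.slice row none (some (max m 0))).filter (fun v => decide (v ≠ 0)))).foldl
          (fun d v => d.insert v (d.getD v 0 + 1)) PySem.Dict.empty).getD k 0),
       (PySem.List.pyRange 0 m 1).map (fun j =>
        PySem.Set.ofList (((PySem.List.slice land none (some (max n 0))).map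
          (fun row => PySem.List.pyGetD row j 0)).filter (fun v => decide (v ≠ 0))))) := rfl
  have hclampn : max n 0 = n := by omega
  have hclampm : max m 0 = m := by omega
  rw [hclampn, hclampm] at halt
  rw [halt]
  -- shared data
  have hcellsB := pv_cellsB land n m hn0 hm0
  have hbound : ∀ v ∈ (((land.take n.toNat).map (fun row => row.take m.toNat)).flatten).filter
      (fun v => decide (v ≠ 0)),
      0 < v ∧ v < (((PySem.List.pyRange 0 id 1).map (fun _ => (0 : Int))).length : Int) := by
    intro v hv
    rw [List.mem_filter] at hv
    obtain ⟨hvf, hvnz⟩ := hv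
    rw [List.mem_flatten] at hvf
    obtain ⟨r, hr, hvr⟩ := hvf
    rw [List.mem_map] at hr
    obtain ⟨row, hrow, rfl⟩ := hr
    have hnz : v ≠ 0 := of_decide_eq_true hvnz
    have h1 := hval row hrow v hvr hnz
    have h2 := hD row hrow v hvr
    have hlen : ((PySem.List.pyRange 0 id 1).map (fun _ => (0 : Int))).length = (id - 0).toNat := by
      rw [List.length_map, PySem.List.length_pyRange_one]
    rw [hlen]
    omega
  -- amount component
  have eA := pv_eA land n m id hn0 hnlen hm0 hrowlen
  -- cols component characterization
  have eC : (PySem.List.pyRange 0 n 1).foldl (fun c i =>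
        (PySem.List.pyRange 0 m 1).foldl (fun c j =>
          let v := PySem.List.pyGetD (PySem.List.pyGetD land i []) j 0
          if v = 0 then c
          else PySem.List.pySetD c j (PySem.Set.add (PySem.List.pyGetD c j PySem.Set.empty) v)) c)
      ((PySem.List.pyRange 0 m 1).map (fun _ => PySem.Set.empty))
      = (land.take n.toNat).foldl (fun c row =>
          (PySem.List.pyRange 0 m 1).foldl (fun c j =>
            let v := PySem.List.pyGetD row j 0
            if v = 0 then c
            else PySem.List.pySetD c j (PySem.Set.add (PySem.List.pyGetD c j PySem.Set.empty) v)) c)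
          ((PySem.List.pyRange 0 m 1).map (fun _ => PySem.Set.empty)) :=
    pv_outer_to_list land n hn0 hnlen
      (F := fun c row => (PySem.List.pyRange 0 m 1).foldl (fun c j =>
        let v := PySem.List.pyGetD row j 0
        if v = 0 then c
        else PySem.List.pySetD c j (PySem.Set.add (PySem.List.pyGetD c j PySem.Set.empty) v)) c)
      ((PySem.List.pyRange 0 m 1).map (fun _ => PySem.Set.empty))
  obtain ⟨hClen, hCget⟩ := pv_cols_fold m (land.take n.toNat)
    ((PySem.List.pyRange 0 m 1).map (fun _ => PySem.Set.empty))
  obtain ⟨hAlen, hAget⟩ := pv_incr_fold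
    ((((land.take n.toNat).map (fun row => row.take m.toNat)).flatten).filter
      (fun v => decide (v ≠ 0)))
    ((PySem.List.pyRange 0 id 1).map (fun _ => (0 : Int))) hbound
  rw [Prod.mk.injEq]
  refine ⟨?_, ?_⟩
  · -- amount component
    refine Eq.trans eA ?_
    apply List.ext_getElem
    · rw [hAlen]; simp
    · intro k h1 h2
      have hk0 : k < ((PySem.List.pyRange 0 id 1).map (fun _ => (0 : Int))).length := by
        rwa [hAlen] at h1
      rw [← List.getD_eq_getElem _ 0 h1, hAget k hk0]
      have hz : ((PySem.List.pyRange 0 id 1).map (fun _ => (0 : Int))).getD k 0 = 0 := by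
        rw [List.getD_eq_getElem _ _ hk0, List.getElem_map]
      rw [hz, zero_add, List.getElem_map, PySem.List.getElem_pyRange_one, zero_add,
        hcellsB, PySem.Dict.foldl_insert_getD_add_one_eq_counter, PySem.Dict.getD_counter]
  · -- columns component
    refine Eq.trans eC ?_
    apply List.ext_getElem
    · rw [hClen]; simp
    · intro k h1 h2
      have hk0 : k < ((PySem.List.pyRange 0 m 1).map
          (fun _ => (PySem.Set.empty : List Int))).length := by
        rwa [hClen] at h1
      have hkm : (k : Int) < m := by
        have hx := hk0
        rw [List.length_map, PySem.List.length_pyRange_one] at hx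
        omega
      rw [← List.getD_eq_getElem _ [] h1, hCget k hk0 hkm]
      have hz : ((PySem.List.pyRange 0 m 1).map
          (fun _ => (PySem.Set.empty : List Int))).getD k [] = ([] : List Int) := by
        rw [List.getD_eq_getElem _ _ hk0, List.getElem_map]; rfl
      rw [hz, List.getElem_map, PySem.List.getElem_pyRange_one, zero_add,
        PySem.Set.ofList_eq_foldl, PySem.List.slice_to land hn0]

-- Characterization of A's amount list as an increment fold over the nonzero scanned cells.
theorem pv_A1_char (land : List (List Int)) (n m id : Int)
    (hn0 : 0 ≤ n) (hnlen : n ≤ (land.length : Int)) (hm0 : 0 ≤ m)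
    (hrowlen : ∀ row ∈ land.take n.toNat, m ≤ (row.length : Int)) :
    (calculate_oil land n m id).1
      = ((((land.take n.toNat).map (fun row => row.take m.toNat)).flatten).filter
          (fun v => decide (v ≠ 0))).foldl
          (fun a v => PySem.List.pySetD a v (PySem.List.pyGetD a v 0 + 1))
          ((PySem.List.pyRange 0 id 1).map (fun _ => (0 : Int))) := by
  rw [pv_split]
  exact pv_eA land n m id hn0 hnlen hm0 hrowlen

-- Characterization of B's amount list as per-id counts of the nonzero scanned cells.
theorem pv_B1_char (land : List (List Int)) (n m id : Int) (hn0 : 0 ≤ n) (hm0 : 0 ≤ m) :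
    (calculate_oil_alt land n m id).1
      = (PySem.List.pyRange 0 id 1).map (fun k =>
          (((((land.take n.toNat).map (fun row => row.take m.toNat)).flatten).filter
            (fun v => decide (v ≠ 0))).count k : Int)) := by
  have h0 : (calculate_oil_alt land n m id).1
      = (PySem.List.pyRange 0 id 1).map (fun k =>
        (((PySem.List.slice land none (some (max n 0))).flatMap
            (fun row => (PySem.List.slice row none (some (max m 0))).filter
              (fun v => decide (v ≠ 0)))).foldl
          (fun d v => d.insert v (d.getD v 0 + 1)) PySem.Dict.empty).getD k 0) := rfl
  rw [h0, show max n 0 = n from by omega, show max m 0 = m from by omega,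
    pv_cellsB land n m hn0 hm0, PySem.Dict.foldl_insert_getD_add_one_eq_counter]
  simp only [PySem.Dict.getD_counter]

-- ===== VERDICT (by name: the statement is the Claim_ definition above) =====
theorem calculate_oil_spec : Claim_unchanged_calculate_oil := by
  intro land n m id _hDom hPre
  unfold Spec_calculate_oil
  intro hD
  unfold Pre_calculate_oil at hPre
  unfold D_calculate_oil at hD
  by_cases hm : 0 < m
  · obtain ⟨h1, h2, h3⟩ := hPre hm
    have hmaxn : (max n 0).toNat = n.toNat := by omega
    have e1 : calculate_oil land n m id = calculate_oil land (max n 0) m id := by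
      unfold calculate_oil
      rw [pv_pyRange_max n]
    have e2 : calculate_oil_alt land n m id = calculate_oil_alt land (max n 0) m id := by
      unfold calculate_oil_alt
      rw [show max (max n 0) 0 = max n 0 from by omega]
    rw [e1, e2]
    refine pv_main land (max n 0) m id ⟨le_max_right n 0, ?_, by omega, ?_, ?_⟩ ?_
    · have hlen0 : (0 : Int) ≤ (land.length : Int) := Int.natCast_nonneg _
      omega
    · intro row hrow
      rw [hmaxn] at hrow
      exact h2 row hrow
    · intro row hrow
      rw [hmaxn] at hrow
      exact h3 row hrow
    · rw [hmaxn]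
      exact hD
  · exact pv_trivial_m land n m id (by omega)

theorem calculate_oil_changed : Claim_changed_calculate_oil := by
  unfold Claim_changed_calculate_oil; decide

theorem calculate_oil_tight : Claim_exact_calculate_oil := by
  intro land n m id _hDom hPre hD
  unfold Pre_calculate_oil at hPre
  unfold D_calculate_oil at hD
  obtain ⟨row0, hrow0, v0, hv0mem, hv0neg⟩ := hD
  have hm : 0 < m := by
    by_contra hc
    have h0 : m.toNat = 0 := by omega
    rw [h0] at hv0mem
    simp at hv0mem
  have hn0 : 0 ≤ n := by
    by_contra hc
    have h0 : n.toNat = 0 := by omega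
    rw [h0] at hrow0
    simp at hrow0
  obtain ⟨h1, h2, h3⟩ := hPre hm
  intro heq
  have hv0cells : v0 ∈ (((land.take n.toNat).map (fun row => row.take m.toNat)).flatten).filter
      (fun v => decide (v ≠ 0)) := by
    rw [List.mem_filter]
    refine ⟨?_, by simp; omega⟩
    rw [List.mem_flatten]
    exact ⟨row0.take m.toNat, List.mem_map.mpr ⟨row0, hrow0, rfl⟩, hv0mem⟩
  have h1eq := congrArg Prod.fst heq
  rw [pv_A1_char land n m id hn0 h1 (by omega) h2,
    pv_B1_char land n m id hn0 (by omega)] at h1eq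
  have hlen0 : ((PySem.List.pyRange 0 id 1).map (fun _ => (0 : Int))).length = (id - 0).toNat := by
    rw [List.length_map, PySem.List.length_pyRange_one]
  have hbnd : ∀ v ∈ (((land.take n.toNat).map (fun row => row.take m.toNat)).flatten).filter
      (fun v => decide (v ≠ 0)),
      -(((PySem.List.pyRange 0 id 1).map (fun _ => (0 : Int))).length : Int) ≤ v ∧
      v < (((PySem.List.pyRange 0 id 1).map (fun _ => (0 : Int))).length : Int) := by
    intro v hv
    rw [List.mem_filter] at hv
    obtain ⟨hvf, hvnz⟩ := hv
    rw [List.mem_flatten] at hvf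
    obtain ⟨r, hr, hvr⟩ := hvf
    rw [List.mem_map] at hr
    obtain ⟨row, hrow, rfl⟩ := hr
    have := h3 row hrow v hvr (of_decide_eq_true hvnz)
    rw [hlen0]
    omega
  obtain ⟨hsumA, _⟩ := pv_sum_incr_fold
    ((((land.take n.toNat).map (fun row => row.take m.toNat)).flatten).filter
      (fun v => decide (v ≠ 0)))
    ((PySem.List.pyRange 0 id 1).map (fun _ => (0 : Int))) hbnd
  have hsum0 : ((PySem.List.pyRange 0 id 1).map (fun _ => (0 : Int))).sum = 0 := by
    rw [PySem.List.sum_map_const_int]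
    ring
  have hsumB := pv_sum_counts (PySem.List.pyRange 0 id 1) (PySem.List.nodup_pyRange_one 0 id)
    ((((land.take n.toNat).map (fun row => row.take m.toNat)).flatten).filter
      (fun v => decide (v ≠ 0)))
  have hs := congrArg List.sum h1eq
  rw [hsumA, hsum0, hsumB] at hs
  have hle : ((((land.take n.toNat).map (fun row => row.take m.toNat)).flatten).filter
      (fun v => decide (v ≠ 0))).countP (fun v => decide (v ∈ PySem.List.pyRange 0 id 1))
      = ((((land.take n.toNat).map (fun row => row.take m.toNat)).flatten).filter
      (fun v => decide (v ≠ 0))).length := by omega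
  have hall := List.countP_eq_length.mp hle
  have hv0in : v0 ∈ PySem.List.pyRange 0 id 1 := of_decide_eq_true (hall v0 hv0cells)
  rw [PySem.List.mem_pyRange_one] at hv0in
  omega
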